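-- pv_equiv track=rewrite | github.com/kashsightplatform/kseye | ks_eye/engines/output_formatter.py | format_index
-- ===== SOURCE A (Python) =====
-- def format_index(terms, max_width=78):
--     """Format index as text"""
--     lines = []
--     current_letter = ""
--     for term in sorted(terms.keys(), key=str.lower):
--         first_letter = term[0].upper()
--         if first_letter != current_letter:
--             current_letter = first_letter
--             lines.append(f"\n  --- {current_letter} ---")
--         lines.append(f"    {term}")
--     return "\n".join(lines)
-- ===== SOURCE B (Python) =====
-- def format_index(terms, max_width=78):
--     """Format index as text"""
--     buckets = {}
--     for term in sorted(terms.keys(), key=str.lower):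
--         buckets.setdefault(term[0].upper(), []).append(term)
--     lines = [
--         line
--         for letter, group in buckets.items()
--         for line in [f"\n  --- {letter} ---", *[f"    {term}" for term in group]]
--     ]
--     return "\n".join(lines)
-- ===== Notes on version B (the rewrite author's own statement) =====
-- stated objective: alternative
-- what changed: Replaces A's sentinel-tracking flat loop (emit a header whenever the tracked letter changes) by a letter-keyed dict of buckets built once with setdefault and then rendered group by group; no letter comparison remains - the grouping is done by the insertion-ordered dict, and equality rests on the proved fact that case-insensitive sorting makes equal-letter keys contiguous.
import Mathlib
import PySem

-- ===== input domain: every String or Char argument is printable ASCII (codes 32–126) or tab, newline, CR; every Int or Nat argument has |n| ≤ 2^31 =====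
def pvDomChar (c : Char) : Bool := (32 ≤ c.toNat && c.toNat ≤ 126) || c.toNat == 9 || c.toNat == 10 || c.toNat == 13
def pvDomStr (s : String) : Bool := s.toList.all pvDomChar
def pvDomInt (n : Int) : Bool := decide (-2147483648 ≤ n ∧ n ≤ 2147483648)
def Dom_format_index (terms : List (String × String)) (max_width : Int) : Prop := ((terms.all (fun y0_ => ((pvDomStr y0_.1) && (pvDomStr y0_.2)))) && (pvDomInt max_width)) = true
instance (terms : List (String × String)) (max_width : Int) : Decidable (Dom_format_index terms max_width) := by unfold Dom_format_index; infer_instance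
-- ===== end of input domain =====

-- B replaces A's sentinel-tracking flat loop by a letter-keyed dict of buckets built with
-- setdefault and rendered group by group (objective: alternative data structure, same cost).

-- shared formatting vocabulary (both Pythons build the very same f-strings)
def pvHdr (l : String) : String := "\n  --- " ++ l ++ " ---"
def pvEntry (t : String) : String := "    " ++ t
-- term[0].upper() (term[0] via pyGetD: Pre_ guarantees nonempty keys, so the default is never used)
def pvFirstUpper (t : String) : String :=
  PySem.Str.upper (String.ofList [PySem.List.pyGetD t.toList 0 ' '])
-- sorted(terms.keys(), key=str.lower), identical in both Pythons
def pvSortedKeys (terms : List (String × String)) : List String :=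
  PySem.List.sorted (PySem.Dict.ofList terms).keys PySem.Str.lower false

-- ===== PORT A =====
-- A's flat loop: append a header line whenever the upper-cased first letter changes
def pvALoop (ts : List String) (lines : List String) (cur : String) : List String :=
  match ts with
  | [] => lines
  | t :: rest =>
    let fl := pvFirstUpper t
    if fl ≠ cur then pvALoop rest (lines ++ [pvHdr fl, pvEntry t]) fl
    else pvALoop rest (lines ++ [pvEntry t]) cur

def format_index (terms : List (String × String)) (max_width : Int) : String :=
  PySem.Str.join "\n" (pvALoop (pvSortedKeys terms) [] "")

-- ===== PORT B =====
-- buckets.setdefault(term[0].upper(), []).append(term): insert key ↦ (current bucket, default []) ++ [term];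
-- Dict.insert overwrites in place, new keys append — exactly Python's dict/setdefault semantics
def pvBuckets (ts : List String) : PySem.Dict String (List String) :=
  ts.foldl (fun d t => d.insert (pvFirstUpper t) (d.getD (pvFirstUpper t) [] ++ [t]))
    PySem.Dict.empty

def format_index_alt (terms : List (String × String)) (max_width : Int) : String :=
  PySem.Str.join "\n"
    ((pvBuckets (pvSortedKeys terms)).items.flatMap (fun p => pvHdr p.1 :: p.2.map pvEntry))

-- ===== PRECONDITION & SPEC =====
-- Pre_ excludes dicts with an empty-string key: both A and B raise IndexError there (term[0]).
def Pre_format_index (terms : List (String × String)) (max_width : Int) : Prop :=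
  ∀ p ∈ terms, p.1 ≠ ""
instance (terms : List (String × String)) (max_width : Int) : Decidable (Pre_format_index terms max_width) := by unfold Pre_format_index; infer_instance

def pvWitness_format_index : (List (String × String)) × Int :=
  ([("apple", "1"), ("Banana", "2"), ("avocado", "3")], 78)

def Spec_format_index (terms : List (String × String)) (max_width : Int) (out : String) : Prop := out = format_index_alt terms max_width
instance (terms : List (String × String)) (max_width : Int) (out : String) : Decidable (Spec_format_index terms max_width out) := by unfold Spec_format_index; infer_instance

-- ===== CLAIM (what is proved, stated in full; the proofs are below) =====
def Claim_equal_format_index : Prop := ∀ (terms : List (String × String)) (max_width : Int), Dom_format_index terms max_width → Pre_format_index terms max_width → Spec_format_index terms max_width (format_index terms max_width)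

-- ===== LEMMAS AND PROOFS =====

-- rendering a dict's items into lines
def pvFlat (gs : List (String × List String)) : List String :=
  gs.flatMap (fun p => pvHdr p.1 :: p.2.map pvEntry)

-- the lower-cased first character of a (nonempty) string: the quantity the sort orders
def pvC (t : String) : Char := PySem.Chars.lowerChar (PySem.List.pyGetD t.toList 0 ' ')

-- ---- Char facts -------------------------------------------------------------
theorem pv_char_le_iff (c d : Char) : c ≤ d ↔ c.toNat ≤ d.toNat :=
  ⟨Fin.mk_le_mk.mp, Fin.mk_le_mk.mpr⟩

theorem pv_char_eq_of_toNat {c d : Char} (h : c.toNat = d.toNat) : c = d := by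
  rw [← Char.ofNat_toNat c, ← Char.ofNat_toNat d, h]

theorem pv_toNat_upperChar (c : Char) :
    (PySem.Chars.upperChar c).toNat =
      if 97 ≤ c.toNat ∧ c.toNat ≤ 122 then c.toNat - 32 else c.toNat := by
  have ha : ('a':Char).toNat = 97 := by decide
  have hz : ('z':Char).toNat = 122 := by decide
  simp only [PySem.Chars.upperChar, PySem.Chars.islower, pv_char_le_iff, ha, hz,
    Bool.and_eq_true, decide_eq_true_eq]
  split_ifs with h1
  · rw [Char.toNat_ofNat, if_pos (Or.inl (by omega))]
  · rfl

theorem pv_toNat_lowerChar (c : Char) :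
    (PySem.Chars.lowerChar c).toNat =
      if 65 ≤ c.toNat ∧ c.toNat ≤ 90 then c.toNat + 32 else c.toNat := by
  have ha : ('A':Char).toNat = 65 := by decide
  have hz : ('Z':Char).toNat = 90 := by decide
  simp only [PySem.Chars.lowerChar, PySem.Chars.isupper, pv_char_le_iff, ha, hz,
    Bool.and_eq_true, decide_eq_true_eq]
  split_ifs with h1
  · rw [Char.toNat_ofNat, if_pos (Or.inl (by omega))]
  · rfl

theorem pv_upper_lower (c : Char) :
    PySem.Chars.upperChar (PySem.Chars.lowerChar c) = PySem.Chars.upperChar c := by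
  apply pv_char_eq_of_toNat
  rw [pv_toNat_upperChar, pv_toNat_upperChar, pv_toNat_lowerChar]
  split_ifs <;> omega

theorem pv_upper_inj {a b : Char}
    (ha : ¬(65 ≤ a.toNat ∧ a.toNat ≤ 90)) (hb : ¬(65 ≤ b.toNat ∧ b.toNat ≤ 90))
    (h : PySem.Chars.upperChar a = PySem.Chars.upperChar b) : a = b := by
  apply pv_char_eq_of_toNat
  have h2 := congrArg Char.toNat h
  rw [pv_toNat_upperChar, pv_toNat_upperChar] at h2
  split_ifs at h2 <;> omega

theorem pv_lowerChar_not_upper (c : Char) :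
    ¬(65 ≤ (PySem.Chars.lowerChar c).toNat ∧ (PySem.Chars.lowerChar c).toNat ≤ 90) := by
  rw [pv_toNat_lowerChar]
  split_ifs <;> omega

-- ---- pvFirstUpper / pvC bridges ---------------------------------------------
theorem pv_string_eq_iff (a b : String) : a = b ↔ a.toList = b.toList := by
  constructor
  · intro h; rw [h]
  · intro h; exact String.toList_inj.mp h

theorem pv_firstUpper_eq_iff (t u : String) :
    pvFirstUpper t = pvFirstUpper u ↔
      PySem.Chars.upperChar (PySem.List.pyGetD t.toList 0 ' ')
        = PySem.Chars.upperChar (PySem.List.pyGetD u.toList 0 ' ') := by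
  rw [pv_string_eq_iff]
  simp [pvFirstUpper, PySem.Chars.upper]

-- equal letter ⇒ equal lowered first char
theorem pv_c_eq_of_firstUpper_eq {t u : String} (h : pvFirstUpper t = pvFirstUpper u) :
    pvC t = pvC u := by
  rw [pv_firstUpper_eq_iff] at h
  unfold pvC
  apply pv_upper_inj (pv_lowerChar_not_upper _) (pv_lowerChar_not_upper _)
  rw [pv_upper_lower, pv_upper_lower, h]

-- equal lowered first char ⇒ equal letter
theorem pv_firstUpper_eq_of_c_eq {t u : String} (h : pvC t = pvC u) :
    pvFirstUpper t = pvFirstUpper u := by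
  rw [pv_firstUpper_eq_iff]
  unfold pvC at h
  rw [← pv_upper_lower, h, pv_upper_lower]

theorem pvFirstUpper_ne_empty (t : String) : pvFirstUpper t ≠ "" := by
  intro h
  have h2 := congrArg String.toList h
  simp [pvFirstUpper, PySem.Chars.upper] at h2

theorem pv_head_le (x y : Char) (xs ys : List Char)
    (h : @LE.le _ List.LE' (x::xs) (y::ys)) : x ≤ y := by
  rcases lt_or_eq_of_le h with h | h
  · exact List.head_le_of_lt h
  · cases h; exact le_refl x

-- the sorted order controls pvC
theorem pv_c_mono {a b : String} (ha : a ≠ "") (hb : b ≠ "")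
    (h : PySem.Str.lower a ≤ PySem.Str.lower b) : pvC a ≤ pvC b := by
  have hla : a.toList ≠ [] := fun hh => ha (String.toList_inj.mp hh)
  have hlb : b.toList ≠ [] := fun hh => hb (String.toList_inj.mp hh)
  have h2 : (PySem.Str.lower a).toList ≤ (PySem.Str.lower b).toList :=
    String.le_iff_toList_le.mp h
  rw [PySem.Str.toList_lower, PySem.Str.toList_lower] at h2
  unfold PySem.Chars.lower at h2
  unfold pvC
  obtain ⟨x, xs, hx⟩ := List.exists_cons_of_ne_nil hla
  obtain ⟨y, ys, hy⟩ := List.exists_cons_of_ne_nil hlb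
  rw [hx, hy] at h2 ⊢
  simp only [List.map_cons] at h2
  have h3 := pv_head_le _ _ _ _ h2
  simpa [PySem.List.pyGetD, PySem.List.pyIdx?, PySem.List.pyGet?] using h3

-- every key of a dict built from terms is a first component of terms
theorem pv_mem_keys_ofList (l : List (String × String)) (k : String)
    (h : k ∈ (PySem.Dict.ofList l).keys) : k ∈ l.map Prod.fst := by
  rw [show (PySem.Dict.ofList l) = l.foldl (fun d p => d.insert p.1 p.2) PySem.Dict.empty from rfl] at h
  rw [PySem.Dict.keys_foldl_insert_key] at h
  rw [show (PySem.Dict.empty : PySem.Dict String String).keys = [] from rfl] at h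
  rw [show PySem.Set.update [] (l.map Prod.fst) = PySem.Set.ofList (l.map Prod.fst) from rfl] at h
  exact (PySem.Set.mem_ofList _ _).mp h

-- ---- A-side loop shape -------------------------------------------------------
theorem pvALoop_append (ts : List String) (lines : List String) (cur : String) :
    pvALoop ts lines cur = lines ++ pvALoop ts [] cur := by
  induction ts generalizing lines cur with
  | nil => simp [pvALoop]
  | cons t rest ih =>
    simp only [pvALoop]
    split
    · rw [ih (lines ++ _), ih ([] ++ _)]
      simp
    · rw [ih (lines ++ _), ih ([] ++ _)]
      simp

-- ---- the main invariant induction --------------------------------------------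
theorem pv_main (ts : List String) (d : PySem.Dict String (List String)) (cur : String)
    (hnd : d.keys.Nodup)
    (hH : ∀ u ∈ ts, pvFirstUpper u ∈ d.keys → pvFirstUpper u = cur)
    (hL : cur ≠ "" → ∃ init g, d.items = init ++ [(cur, g)])
    (hM : ∀ u ∈ ts, cur ≠ "" → ∃ w : String, pvFirstUpper w = cur ∧ pvC w ≤ pvC u)
    (hP : ts.Pairwise (fun a b => pvC a ≤ pvC b)) :
    pvFlat (ts.foldl (fun d t =>
        d.insert (pvFirstUpper t) (d.getD (pvFirstUpper t) [] ++ [t])) d).items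
      = pvFlat d.items ++ pvALoop ts [] cur := by
  induction ts generalizing d cur with
  | nil => simp [pvALoop]
  | cons t rest ih =>
    simp only [List.foldl_cons]
    by_cases hcur : pvFirstUpper t = cur
    · -- same letter as the sentinel: A appends an entry, B appends into the LAST bucket
      have hcne : cur ≠ "" := hcur ▸ pvFirstUpper_ne_empty t
      obtain ⟨init, g, hitems⟩ := hL hcne
      have hkeys : d.keys = init.map Prod.fst ++ [cur] := by
        simp [PySem.Dict.keys, hitems]
      have hnotin : cur ∉ init.map Prod.fst := by
        rw [hkeys] at hnd
        rcases List.nodup_append.mp hnd with ⟨-, -, hdisj⟩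
        intro hmem
        exact hdisj _ hmem cur (by simp) rfl
      have hmem : cur ∈ d.keys := by rw [hkeys]; simp
      have hcont : d.contains cur = true := (PySem.Dict.contains_iff_mem_keys d cur).mpr hmem
      have hg : d.getD cur [] = g :=
        PySem.Dict.getD_of_mem_items d (by rw [hitems]; simp) hnd []
      have hitems' :
          (d.insert (pvFirstUpper t) (d.getD (pvFirstUpper t) [] ++ [t])).items
            = init ++ [(cur, g ++ [t])] := by
        rw [hcur, hg, PySem.Dict.items_insert_of_contains d _ hcont, hitems, List.map_append]
        congr 1
        · rw [List.map_congr_left (g := id) ?_, List.map_id]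
          intro p hp
          have : p.1 ≠ cur := fun h => hnotin (h ▸ List.mem_map_of_mem hp)
          simp [this]
        · simp
      have hkeys' : (d.insert (pvFirstUpper t) (d.getD (pvFirstUpper t) [] ++ [t])).keys = d.keys := by
        rw [hcur]; exact PySem.Dict.keys_insert_of_contains d _ hcont
      rw [ih _ cur (by rw [hkeys']; exact hnd)
            (fun u hu => by rw [hkeys']; exact hH u (List.mem_cons_of_mem t hu))
            (fun _ => ⟨init, g ++ [t], hitems'⟩)
            (fun u hu hc => hM u (List.mem_cons_of_mem t hu) hc)
            hP.of_cons]
      rw [hitems']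
      simp only [pvALoop, if_neg (not_not_intro hcur)]
      rw [pvALoop_append rest ([] ++ [pvEntry t]) cur]
      simp [pvFlat, hitems]
    · -- new letter: A emits a header, B appends a fresh bucket
      have hncont : d.contains (pvFirstUpper t) = false := by
        by_contra hc
        have : d.contains (pvFirstUpper t) = true := by
          cases h : d.contains (pvFirstUpper t) with
          | true => rfl
          | false => exact absurd h hc
        exact hcur (hH t (List.mem_cons_self) ((PySem.Dict.contains_iff_mem_keys d _).mp this))
      have hitems' :
          (d.insert (pvFirstUpper t) (d.getD (pvFirstUpper t) [] ++ [t])).items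
            = d.items ++ [(pvFirstUpper t, [t])] := by
        rw [PySem.Dict.getD_of_not_contains d [] hncont,
          PySem.Dict.items_insert_of_not_contains d _ hncont]
        simp
      have hkeys' : (d.insert (pvFirstUpper t) (d.getD (pvFirstUpper t) [] ++ [t])).keys
          = d.keys ++ [pvFirstUpper t] :=
        PySem.Dict.keys_insert_of_not_contains d _ hncont
      have hnotin : pvFirstUpper t ∉ d.keys := fun h =>
        by simp [(PySem.Dict.contains_iff_mem_keys d _).mpr h] at hncont
      have hrel : ∀ u ∈ rest, pvC t ≤ pvC u := (List.pairwise_cons.mp hP).1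
      have hH' : ∀ u ∈ rest,
          pvFirstUpper u ∈ d.keys ++ [pvFirstUpper t] → pvFirstUpper u = pvFirstUpper t := by
        intro u hu hmem
        rcases List.mem_append.mp hmem with hmem | hmem
        · exfalso
          have hucur : pvFirstUpper u = cur := hH u (List.mem_cons_of_mem t hu) hmem
          have hcne : cur ≠ "" := hucur ▸ pvFirstUpper_ne_empty u
          obtain ⟨w, hw1, hw2⟩ := hM t (List.mem_cons_self) hcne
          have h1 : pvC u = pvC w := pv_c_eq_of_firstUpper_eq (hucur.trans hw1.symm)
          have h2 : pvC t = pvC w := le_antisymm (h1 ▸ hrel u hu) hw2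
          exact hcur ((pv_firstUpper_eq_of_c_eq h2).trans hw1)
        · simpa using hmem
      rw [ih _ (pvFirstUpper t)
            (by rw [hkeys']; simp only [List.nodup_append]; exact ⟨hnd, List.nodup_singleton _, fun a ha b hb => by simp at hb; exact fun h => hnotin ((h.trans hb) ▸ ha)⟩)
            (fun u hu hmem => hH' u hu (hkeys' ▸ hmem))
            (fun _ => ⟨d.items, [t], hitems'⟩)
            (fun u hu _ => ⟨t, rfl, hrel u hu⟩)
            hP.of_cons]
      rw [hitems']
      simp only [pvALoop, if_pos hcur]
      rw [pvALoop_append rest ([] ++ [pvHdr (pvFirstUpper t), pvEntry t]) (pvFirstUpper t)]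
      simp [pvFlat]

-- every sorted key is a key of the dict, hence nonempty under Pre_
theorem pv_sorted_keys_ne_empty (terms : List (String × String))
    (hpre : ∀ p ∈ terms, p.1 ≠ "") : ∀ u ∈ pvSortedKeys terms, u ≠ "" := by
  intro u hu
  have h1 : u ∈ (PySem.Dict.ofList terms).keys :=
    (PySem.List.mem_sorted _ _ _ _).mp hu
  obtain ⟨p, hp, hfst⟩ := List.mem_map.mp (pv_mem_keys_ofList terms u h1)
  exact hfst ▸ hpre p hp

-- ===== VERDICT (by name: the statement is the Claim_ definition above) =====
theorem format_index_spec : Claim_equal_format_index := by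
  intro terms max_width _ hpre
  unfold Spec_format_index format_index format_index_alt
  congr 1
  have hne := pv_sorted_keys_ne_empty terms hpre
  have hP : (pvSortedKeys terms).Pairwise (fun a b => pvC a ≤ pvC b) := by
    refine List.Pairwise.imp_of_mem ?_ (PySem.List.sorted_pairwise _ PySem.Str.lower)
    intro a b ha hb hab
    exact pv_c_mono (hne a ha) (hne b hb) hab
  have h := pv_main (pvSortedKeys terms) PySem.Dict.empty ""
    PySem.Dict.nodup_keys_empty
    (fun u _ hmem => absurd hmem (by simp [PySem.Dict.keys, PySem.Dict.empty]))
    (fun h => absurd rfl h)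
    (fun u _ h => absurd rfl h)
    hP
  rw [show pvBuckets (pvSortedKeys terms) = (pvSortedKeys terms).foldl
      (fun d t => d.insert (pvFirstUpper t) (d.getD (pvFirstUpper t) [] ++ [t]))
      PySem.Dict.empty from rfl]
  rw [show ((pvSortedKeys terms).foldl
      (fun d t => d.insert (pvFirstUpper t) (d.getD (pvFirstUpper t) [] ++ [t]))
      PySem.Dict.empty).items.flatMap (fun p => pvHdr p.1 :: p.2.map pvEntry)
      = pvFlat ((pvSortedKeys terms).foldl
      (fun d t => d.insert (pvFirstUpper t) (d.getD (pvFirstUpper t) [] ++ [t]))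
      PySem.Dict.empty).items from rfl]
  rw [h]
  simp [pvFlat, PySem.Dict.empty]
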